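-- pv_equiv track=rewrite | github.com/darkismus/mooc-ohjelmointi-21 | osa04-25_naapureita_listassa/src/naapureita_listassa.py | pisin_naapurijono
-- ===== SOURCE A (Python) =====
-- def pisin_naapurijono(lista : list):
--     pisin = 0
--     nykyinen = 1
--     apumuuttuja = 0
--     for i in lista:
--         if apumuuttuja+1 < len(lista) and (i == (lista[apumuuttuja+1]+1) or i == (lista[apumuuttuja+1]-1)):
--             nykyinen += 1
--         else:
--             if pisin < nykyinen:
--                 pisin = nykyinen
--             nykyinen = 1
--         apumuuttuja += 1
--     return pisin
-- ===== SOURCE B (Python) =====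
-- def pisin_naapurijono(lista: list):
--     if not lista:
--         return 0
--     # phase 1: table of neighbour-adjacency flags
--     adj = [a == b + 1 or a == b - 1 for a, b in zip(lista, lista[1:])]
--     # phase 2: longest run of consecutive True flags
--     best = 0
--     j = 0
--     n = len(adj)
--     while j < n:
--         if adj[j]:
--             k = j + 1
--             while k < n and adj[k]:
--                 k += 1
--             if k - j > best:
--                 best = k - j
--             j = k
--         else:
--             j += 1
--     return best + 1
-- ===== Notes on version B (the rewrite author's own statement) =====
-- stated objective: alternative
-- what changed: Replaces A's single fused loop (running counter with index lookahead into the list) by a two-phase decomposition: first build a boolean table of neighbour-adjacency flags from zipped element pairs, then find the longest run of consecutive True flags by a run-splitting scan (skip a False, or jump over a whole True run with an inner scan), returning 0 for the empty list and run+1 otherwise.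
import Mathlib
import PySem

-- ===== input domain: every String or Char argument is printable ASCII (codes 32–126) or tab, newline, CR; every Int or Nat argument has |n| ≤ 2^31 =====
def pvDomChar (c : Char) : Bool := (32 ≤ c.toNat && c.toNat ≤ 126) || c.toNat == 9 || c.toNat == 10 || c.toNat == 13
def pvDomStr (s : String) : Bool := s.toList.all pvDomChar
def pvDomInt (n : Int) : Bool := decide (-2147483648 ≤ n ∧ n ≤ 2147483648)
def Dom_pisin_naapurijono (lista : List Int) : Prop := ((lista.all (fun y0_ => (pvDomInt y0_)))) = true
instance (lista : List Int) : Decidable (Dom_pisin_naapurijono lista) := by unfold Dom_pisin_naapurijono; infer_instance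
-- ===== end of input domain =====

-- B replaces A's fused indexed loop by a two-phase decomposition (adjacency-flag table, then a
-- run-splitting longest-run scan); objective: alternative structure, no speed claim.

-- ===== PORT A =====
-- one step of A's for-loop; state = (pisin, nykyinen, apumuuttuja)
def stepA (lista : List Int) (st : Int × Int × Int) (i : Int) : Int × Int × Int :=
  let pisin := st.1
  let nykyinen := st.2.1
  let apu := st.2.2
  if (decide (apu + 1 < (lista.length : Int)) &&
      (match PySem.List.pyGet? lista (apu + 1) with
       | some x => (i == x + 1) || (i == x - 1)
       | none => false)) then
    (pisin, nykyinen + 1, apu + 1)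
  else
    ((if pisin < nykyinen then nykyinen else pisin), 1, apu + 1)

def pisin_naapurijono (lista : List Int) : Int :=
  (lista.foldl (stepA lista) (0, 1, 0)).1

-- ===== PORT B =====
-- port of B's outer while loop: skip a False flag, or measure the whole run of True flags
-- (inner while = takeWhile/dropWhile over the remaining flags) and keep the maximum
def runsBestAlt : List Bool → Int → Int
  | [], best => best
  | false :: r, best => runsBestAlt r best
  | true :: r, best =>
      let t : Int := 1 + ((r.takeWhile (fun b => b)).length : Int)
      runsBestAlt (r.dropWhile (fun b => b)) (if t > best then t else best)
termination_by r _ => r.length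
decreasing_by
  · simp
  · have := List.length_dropWhile_le (p := fun b => b) (l := r); simp at this ⊢; omega

def pisin_naapurijono_alt (lista : List Int) : Int :=
  if lista = [] then 0
  else
    -- adj = [a == b + 1 or a == b - 1 for a, b in zip(lista, lista[1:])]  (lista[1:] = drop 1)
    let adj := (lista.zip (lista.drop 1)).map (fun p => (p.1 == p.2 + 1) || (p.1 == p.2 - 1))
    runsBestAlt adj 0 + 1

-- ===== PRECONDITION & SPEC =====
def Spec_pisin_naapurijono (lista : List Int) (out : Int) : Prop := out = pisin_naapurijono_alt lista
instance (lista : List Int) (out : Int) : Decidable (Spec_pisin_naapurijono lista out) := by unfold Spec_pisin_naapurijono; infer_instance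

-- ===== CLAIM (what is proved, stated in full; the proofs are below) =====
def Claim_equal_pisin_naapurijono : Prop := ∀ (lista : List Int), Dom_pisin_naapurijono lista → Spec_pisin_naapurijono lista (pisin_naapurijono lista)

-- ===== LEMMAS AND PROOFS =====

-- adjacency-flag table of a list
def adjOf (l : List Int) : List Bool :=
  (l.zip (l.drop 1)).map (fun p => (p.1 == p.2 + 1) || (p.1 == p.2 - 1))

-- length of the leading run of True flags
def lead (r : List Bool) : Int := ((r.takeWhile (fun b => b)).length : Int)

-- longest run of consecutive True flags (structural reference version)
def M : List Bool → Int
  | [] => 0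
  | b :: r => if b then max (1 + lead r) (M r) else M r

-- A's loop, abstracted to the flag list: F adj p c = final pisin after consuming the
-- flags adj and then the final (out-of-range) iteration
def gA (st : Int × Int) (b : Bool) : Int × Int :=
  if b then (st.1, st.2 + 1) else ((if st.1 < st.2 then st.2 else st.1), 1)

def F (adj : List Bool) (p c : Int) : Int := (List.foldl gA (p, c) (adj ++ [false])).1

theorem M_nonneg : ∀ r, 0 ≤ M r := by
  intro r; induction r with
  | nil => simp [M]
  | cons b r ih => unfold M; split <;> omega

theorem lead_nonneg (r : List Bool) : 0 ≤ lead r := by simp [lead]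

theorem lead_le_M : ∀ r, lead r ≤ M r := by
  intro r; induction r with
  | nil => simp [lead, M]
  | cons b r ih =>
    cases b with
    | false => simpa [lead, M, List.takeWhile] using M_nonneg r
    | true =>
      have h1 : lead (true :: r) = 1 + lead r := by simp [lead, List.takeWhile]; omega
      have := lead_nonneg r
      simp only [M, if_true]
      omega

theorem M_eq_drop : ∀ r, M r = max (lead r) (M (r.dropWhile (fun b => b))) := by
  intro r; induction r with
  | nil => simp [M, lead]
  | cons b r ih =>
    cases b with
    | false =>
      have := M_nonneg r
      simp [M, lead, List.takeWhile, List.dropWhile]; omega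
    | true =>
      have h1 : lead (true :: r) = 1 + lead r := by simp [lead, List.takeWhile]; omega
      have h2 := lead_le_M r
      simp only [M, List.dropWhile, if_true, h1, ih]
      omega

theorem runsBestAlt_eq (r : List Bool) (best : Int) (hb : 0 ≤ best) :
    runsBestAlt r best = max best (M r) := by
  induction hn : r.length using Nat.strong_induction_on generalizing r best with
  | _ n ih =>
  cases r with
  | nil => simp [runsBestAlt, M]; omega
  | cons b r =>
    cases b with
    | false =>
      rw [runsBestAlt, ih r.length (by simp [← hn]) r best hb rfl]
      simp [M]
    | true =>
      have hlr := lead_nonneg r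
      have hM := M_eq_drop r
      have hMd := M_nonneg (r.dropWhile (fun b => b))
      rw [runsBestAlt,
        ih (r.dropWhile (fun b => b)).length
          (by have := List.length_dropWhile_le (p := fun b => b) (l := r); simp [← hn]; omega)
          _ _ (by simp only [lead] at hlr; split <;> omega) rfl]
      simp only [M, if_true, lead] at *
      split <;> omega

theorem F_eq : ∀ (adj : List Bool) (p c : Int), 1 ≤ c →
    F adj p c = max p (max (c + lead adj) (1 + M adj)) := by
  intro adj; induction adj with
  | nil =>
    intro p c hc
    simp only [F, List.nil_append, List.foldl_cons, List.foldl_nil, gA]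
    simp [M, lead]
    split <;> omega
  | cons b r ih =>
    intro p c hc
    cases b with
    | false =>
      have hF : F (false :: r) p c = F r (if p < c then c else p) 1 := by
        simp [F, gA]
      rw [hF, ih _ 1 le_rfl]
      have h0 : lead (false :: r) = 0 := by simp [lead, List.takeWhile]
      have hM : M (false :: r) = M r := by simp [M]
      have h2 := lead_le_M r
      have h3 := M_nonneg r
      rw [h0, hM]
      split <;> omega
    | true =>
      have hF : F (true :: r) p c = F r p (c + 1) := by simp [F, gA]
      rw [hF, ih p (c + 1) (by omega)]
      have h1 : lead (true :: r) = 1 + lead r := by simp [lead, List.takeWhile]; omega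
      simp only [M, if_true, h1]
      omega

-- A's indexed loop over a suffix of lista computes F of that suffix's flag table
theorem loopA (lista : List Int) : ∀ (suf : List Int) (p c : Int) (j : Nat),
    lista.drop j = suf → suf ≠ [] →
    (List.foldl (stepA lista) (p, c, (j : Int)) suf).1 = F (adjOf suf) p c := by
  intro suf; induction suf with
  | nil => intro _ _ _ _ h; exact absurd rfl h
  | cons x rest ih =>
    intro p c j hdrop _
    have hj : j < lista.length := by
      by_contra h
      rw [List.drop_eq_nil_of_le (by omega)] at hdrop
      simp at hdrop
    cases rest with
    | nil =>
      -- last element: the guard apu+1 < len fails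
      have hlen : lista.length = j + 1 := by
        have := congrArg List.length hdrop
        simp [List.length_drop] at this
        omega
      have hguard : ¬ ((j : Int) + 1 < (lista.length : Int)) := by
        rw [hlen]; push_cast; omega
      simp only [List.foldl_cons, List.foldl_nil, stepA, hguard, decide_false,
        Bool.false_and]
      simp [adjOf, F, gA]
    | cons y rest' =>
      have hlen : j + 2 ≤ lista.length := by
        have := congrArg List.length hdrop
        simp [List.length_drop] at this
        omega
      have hguard : ((j : Int) + 1 < (lista.length : Int)) := by push_cast; omega
      have hget : PySem.List.pyGet? lista ((j : Int) + 1) = some y := by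
        have h1 : ((j : Int) + 1) = ((j + 1 : Nat) : Int) := by push_cast; ring
        rw [h1, PySem.List.pyGet?_natCast]
        have : (lista.drop j)[1]? = lista[j + 1]? := by
          rw [List.getElem?_drop]
        rw [← this, hdrop]
        rfl
      have hdrop' : lista.drop (j + 1) = y :: rest' := by
        have : lista.drop (j + 1) = (lista.drop j).drop 1 := by
          rw [← List.drop_drop]
        rw [this, hdrop]; rfl
      have hcast : ((j : Int) + 1) = (((j + 1 : Nat)) : Int) := by push_cast; ring
      have hadj : adjOf (x :: y :: rest') =
          ((x == y + 1) || (x == y - 1)) :: adjOf (y :: rest') := by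
        simp [adjOf]
      rw [List.foldl_cons]
      have hstep : stepA lista (p, c, (j : Int)) x =
          (if ((x == y + 1) || (x == y - 1)) then (p, c + 1, (j : Int) + 1)
           else ((if p < c then c else p), 1, (j : Int) + 1)) := by
        simp only [stepA, hget, hguard, decide_true, Bool.true_and]
      rw [hstep, hadj]
      cases hb : ((x == y + 1) || (x == y - 1)) with
      | true =>
        simp only [if_true]
        rw [hcast, ih p (c + 1) (j + 1) hdrop' (by simp)]
        simp [F, gA]
      | false =>
        simp only [Bool.false_eq_true, if_false]
        rw [hcast, ih (if p < c then c else p) 1 (j + 1) hdrop' (by simp)]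
        simp [F, gA]

-- ===== VERDICT (by name: the statement is the Claim_ definition above) =====
theorem pisin_naapurijono_spec : Claim_equal_pisin_naapurijono := by
  intro lista _
  unfold Spec_pisin_naapurijono pisin_naapurijono pisin_naapurijono_alt
  cases lista with
  | nil => rfl
  | cons x rest =>
    have h1 := loopA (x :: rest) (x :: rest) 0 1 0 (by simp) (by simp)
    simp only [Nat.cast_zero] at h1
    rw [h1, F_eq _ 0 1 le_rfl, if_neg (by simp)]
    have h2 := lead_le_M (adjOf (x :: rest))
    have h3 := M_nonneg (adjOf (x :: rest))
    show max 0 (max (1 + lead (adjOf (x :: rest))) (1 + M (adjOf (x :: rest)))) =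
      runsBestAlt (adjOf (x :: rest)) 0 + 1
    rw [runsBestAlt_eq _ 0 le_rfl]
    omega
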